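-- pv_equiv track=rewrite | github.com/GuilhermeAureliano/programacao-1 | unidade9/toppl.py | filtra_alunos
-- ===== SOURCE A (Python) =====
-- def meu_in(inscritos, parametro):
--     for e in inscritos:
--         if parametro == e:
--             return True
--     return False
--
-- def filtra_alunos(alunos, inscritos, media):
--     indices = []
--     for i in range(len(alunos)):
--         parametro = alunos[i][0]
--         nota = alunos[i][1]
--         if not meu_in(inscritos, parametro) or nota < media:
--             indices.append(i)
--     remov = 0
--     for i in indices:
--         alunos.pop(i - remov)
--         remov += 1
--     return remov
-- ===== SOURCE B (Python) =====
-- def filtra_alunos(alunos, inscritos, media):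
--     antes = len(alunos)
--     kept = [a for a in alunos if a[0] in inscritos and a[1] >= media]
--     alunos[:] = kept
--     return antes - len(kept)
-- ===== Notes on version B (the rewrite author's own statement) =====
-- stated objective: simpler
-- what changed: Replaces the two-phase scheme (collect removal indices, then pop each with a running offset) by one kept-list filter pass with slice assignment, returning the count as a length difference.
import Mathlib
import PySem

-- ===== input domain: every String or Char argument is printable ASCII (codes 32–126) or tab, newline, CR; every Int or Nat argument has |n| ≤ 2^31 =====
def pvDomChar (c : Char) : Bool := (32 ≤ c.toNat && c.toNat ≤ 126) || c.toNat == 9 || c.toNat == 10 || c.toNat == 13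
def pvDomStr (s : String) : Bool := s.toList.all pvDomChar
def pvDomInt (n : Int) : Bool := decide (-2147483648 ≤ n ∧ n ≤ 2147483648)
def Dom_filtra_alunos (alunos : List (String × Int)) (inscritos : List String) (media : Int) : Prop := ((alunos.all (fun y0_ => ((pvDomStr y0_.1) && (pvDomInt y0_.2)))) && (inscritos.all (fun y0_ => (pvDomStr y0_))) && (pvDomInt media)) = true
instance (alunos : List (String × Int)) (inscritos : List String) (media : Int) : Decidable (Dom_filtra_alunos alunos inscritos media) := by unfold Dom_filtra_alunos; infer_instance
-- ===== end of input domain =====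

-- B replaces A's index-collection-plus-offset-pop two-phase scheme by one kept-list filter pass,
-- returning the count as a length difference (equivalence is about the RETURN value; both Pythons
-- mutate `alunos` identically — A by pops, B by slice assignment).
-- ===== PORT A =====
def meu_in (inscritos : List String) (parametro : String) : Bool :=
  match inscritos with
  | [] => false
  | e :: rest => if parametro == e then true else meu_in rest parametro

def filtra_alunos (alunos : List (String × Int)) (inscritos : List String) (media : Int) : Int :=
  -- first loop: collect the indices to remove (alunos[i] is always in range; pyGetD is exact here)
  let indices : List Int :=
    (PySem.List.pyRange 0 (alunos.length : Int) 1).foldl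
      (fun acc i =>
        let a := PySem.List.pyGetD alunos i ("", 0)
        if !(meu_in inscritos a.1) || a.2 < media then acc ++ [i] else acc) []
  -- second loop: pop with a running offset (pop? never misses on these indices; on a miss the list is kept)
  let st : List (String × Int) × Int :=
    indices.foldl
      (fun st i =>
        match PySem.List.pop? st.1 (i - st.2) with
        | some (_, rest) => (rest, st.2 + 1)
        | none => (st.1, st.2 + 1)) (alunos, 0)
  st.2


-- ===== PORT B =====
def filtra_alunos_alt (alunos : List (String × Int)) (inscritos : List String) (media : Int) : Int :=
  let antes : Int := alunos.length
  let kept := alunos.filter (fun a => inscritos.contains a.1 && decide (media ≤ a.2))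
  antes - kept.length


-- ===== PRECONDITION & SPEC =====
def Spec_filtra_alunos (alunos : List (String × Int)) (inscritos : List String) (media : Int) (out : Int) : Prop := out = filtra_alunos_alt alunos inscritos media
instance (alunos : List (String × Int)) (inscritos : List String) (media : Int) (out : Int) : Decidable (Spec_filtra_alunos alunos inscritos media out) := by unfold Spec_filtra_alunos; infer_instance

-- ===== CLAIM (what is proved, stated in full; the proofs are below) =====
def Claim_equal_filtra_alunos : Prop := ∀ (alunos : List (String × Int)) (inscritos : List String) (media : Int), Dom_filtra_alunos alunos inscritos media → Spec_filtra_alunos alunos inscritos media (filtra_alunos alunos inscritos media)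

-- ===== LEMMAS AND PROOFS =====

-- ===== VERDICT (by name: the statement is the Claim_ definition above) =====
theorem meu_in_eq_contains (inscritos : List String) (p : String) :
    meu_in inscritos p = inscritos.contains p := by
  induction inscritos with
  | nil => rfl
  | cons e rest ih =>
    by_cases h : p == e
    · simp [meu_in, h]
      exact Or.inl (by simpa using h)
    · simp [meu_in, h, ih]
      intro hpe
      simp [hpe] at h

theorem pop_loop_snd (indices : List Int) (st : List (String × Int) × Int) :
    (indices.foldl
      (fun st i =>
        match PySem.List.pop? st.1 (i - st.2) with
        | some (_, rest) => (rest, st.2 + 1)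
        | none => (st.1, st.2 + 1)) st).2 = st.2 + indices.length := by
  induction indices generalizing st with
  | nil => simp
  | cons i rest ih =>
    simp only [List.foldl_cons, ih]
    cases h : PySem.List.pop? st.1 (i - st.2) with
    | none => simp; omega
    | some pr => cases pr; simp; omega

theorem collect_length (L : List Int) (p : Int → Bool) (acc : List Int) :
    (L.foldl (fun acc i => if p i then acc ++ [i] else acc) acc).length
      = acc.length + L.countP p := by
  induction L generalizing acc with
  | nil => simp
  | cons i rest ih =>
    simp only [List.foldl_cons, List.countP_cons, ih]
    by_cases h : p i
    · simp [h]
      omega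
    · simp [h]

theorem filtra_alunos_spec : Claim_equal_filtra_alunos := by
  intro alunos inscritos media _
  unfold Spec_filtra_alunos filtra_alunos filtra_alunos_alt
  simp only
  rw [pop_loop_snd, collect_length]
  have hmap : (PySem.List.pyRange 0 (alunos.length : Int) 1).countP
      (fun i => (!(meu_in inscritos (PySem.List.pyGetD alunos i ("", 0)).1)
        || (PySem.List.pyGetD alunos i ("", 0)).2 < media : Bool))
      = alunos.countP (fun a => (!(meu_in inscritos a.1) || a.2 < media : Bool)) := by
    conv_rhs => rw [← PySem.List.map_pyGetD_pyRange_zero (xs := alunos) (d := ("", 0))]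
    rw [List.countP_map]
    rfl
  rw [hmap]
  have hnot : alunos.countP (fun a => (!(meu_in inscritos a.1) || a.2 < media : Bool))
      = alunos.countP (fun a => !(inscritos.contains a.1 && decide (media ≤ a.2))) := by
    apply List.countP_congr
    intro a _
    rw [meu_in_eq_contains]
    by_cases h1 : inscritos.contains a.1 <;> by_cases h2 : media ≤ a.2 <;>
      simp [h2] <;> omega
  rw [hnot]
  have hlen := alunos.length_eq_countP_add_countP
    (fun a => (inscritos.contains a.1 && decide (media ≤ a.2) : Bool))
  simp only [decide_not, Bool.decide_eq_true] at hlen ⊢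
  simp only [List.countP_eq_length_filter, List.length_nil] at *
  omega
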